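-- pv_equiv track=rewrite | github.com/Mitesh512/Data-Structure-and-algotirhms | array_sorting_binary_search_sliding_prefix_greedy/sliding_window.py | detect_k_consecutive
-- ===== SOURCE A (Python) =====
-- def detect_k_consecutive(nums,k):
--     # Return all starting indices
--     # where a group of exactly k consecutive identical transactions occurred.
--     """
--     This has to be addressed through a dynmaic sliding window
--     move r if previous one is equal to curr one
--     use a variable cnt, once we find k consecutive, get index of the start
--     r-k+1
--     update l +1, decrease the cnt and check the next element
--     continue this process
--     """
--
--     n = len(nums)
--     if k>n:
--         return []
--     # # edge case len of nums is 1 and k is also 1 , we can return [0]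
--     # if n==1 and k==1:
--     #     return [0]
--
--     r = 0
--     cnt = 0
--     prev = None
--     start_indices_of_k_consecutive = []
--
--     while r<n:
--         curr = nums[r]
--         if curr == prev:
--             cnt += 1
--         else: # curr != prev:
--             cnt = 1
--
--         if cnt == k:
--             # we have found the k consecutive characters
--             ind = r - k + 1
--             start_indices_of_k_consecutive.append(ind)
--
--             # we will update the l and cnt
--             # by increasing l by 1 and reducing cnt by 1
--             cnt -= 1
--
--         prev = curr
--         r += 1
--
--     return start_indices_of_k_consecutive
-- ===== SOURCE B (Python) =====
-- def detect_k_consecutive(nums, k):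
--     # Run-length decomposition: find each maximal run [start, end) of equal
--     # elements, then emit its qualifying window starts directly.
--     n = len(nums)
--     if k <= 0 or k > n:
--         return []
--     res = []
--     start = 0
--     while start < n:
--         end = start
--         while end < n and nums[end] == nums[start]:
--             end += 1
--         # maximal run occupies [start, end); its window starts are start .. end-k
--         res.extend(range(start, end - k + 1))
--         start = end
--     return res
-- ===== Notes on version B (the rewrite author's own statement) =====
-- stated objective: alternative
-- what changed: B replaces A's sliding-window counter (cnt/prev state updated per element, decrement-on-hit) with a run-length decomposition: it finds each maximal run of equal elements and emits the run's window-start range directly via extend(range(...)).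
import Mathlib
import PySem

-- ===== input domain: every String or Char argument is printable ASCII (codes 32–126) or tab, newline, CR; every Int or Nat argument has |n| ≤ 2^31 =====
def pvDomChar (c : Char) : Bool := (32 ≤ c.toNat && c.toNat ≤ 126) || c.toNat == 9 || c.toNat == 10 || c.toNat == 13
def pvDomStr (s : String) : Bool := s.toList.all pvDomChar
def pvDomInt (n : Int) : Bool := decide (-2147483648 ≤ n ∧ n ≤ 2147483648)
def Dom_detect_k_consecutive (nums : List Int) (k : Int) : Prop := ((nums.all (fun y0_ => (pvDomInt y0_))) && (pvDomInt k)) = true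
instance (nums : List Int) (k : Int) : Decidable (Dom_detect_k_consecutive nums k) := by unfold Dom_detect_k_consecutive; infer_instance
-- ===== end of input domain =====

-- ===== PORT A =====
-- B re-implements A by run-length decomposition instead of A's sliding-window counter ("alternative").
-- Transliteration of A's while loop: state (r, cnt, prev, acc), one step per element.
def loopA (k : Int) : List Int → Int → Int → Option Int → List Int → List Int
  | [], _, _, _, acc => acc
  | curr :: rest, r, cnt, prev, acc =>
    let cnt1 := if some curr = prev then cnt + 1 else 1
    let p := if cnt1 = k then (cnt1 - 1, acc ++ [r - k + 1]) else (cnt1, acc)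
    loopA k rest (r + 1) p.1 (some curr) p.2

def detect_k_consecutive (nums : List Int) (k : Int) : List Int :=
  if k > (nums.length : Int) then [] else loopA k nums 0 0 none []

-- ===== PORT B =====
-- Inner while of Source B: number of further elements equal to the run's first element.
def spanLen (x : Int) : List Int → Nat
  | [] => 0
  | y :: t => if y = x then spanLen x t + 1 else 0

-- Outer while of Source B, tracking the current suffix alongside the index `start`
-- (end = start + run length); exact step-for-step transcription of the loop.
def bLoop (k : Int) : List Int → Int → List Int → List Int
  | [], _, res => res
  | x :: t, start, res =>
      let m : Nat := spanLen x t + 1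
      bLoop k (List.drop (spanLen x t) t) (start + (m : Int))
        (res ++ PySem.List.pyRange start (start + (m : Int) - k + 1) 1)
  termination_by l _ _ => l.length
  decreasing_by simp [List.length_drop]

def detect_k_consecutive_alt (nums : List Int) (k : Int) : List Int :=
  if k ≤ 0 ∨ k > (nums.length : Int) then [] else bLoop k nums 0 []

-- ===== PRECONDITION & SPEC =====
def Spec_detect_k_consecutive (nums : List Int) (k : Int) (out : List Int) : Prop := out = detect_k_consecutive_alt nums k
instance (nums : List Int) (k : Int) (out : List Int) : Decidable (Spec_detect_k_consecutive nums k out) := by unfold Spec_detect_k_consecutive; infer_instance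

-- ===== CLAIM (what is proved, stated in full; the proofs are below) =====
def Claim_equal_detect_k_consecutive : Prop := ∀ (nums : List Int) (k : Int), Dom_detect_k_consecutive nums k → Spec_detect_k_consecutive nums k (detect_k_consecutive nums k)

-- ===== LEMMAS AND PROOFS =====

-- headOk x rest: rest is empty or starts with an element ≠ x (a run boundary)
def headOk (x : Int) (rest : List Int) : Prop := ∀ y t, rest = y :: t → y ≠ x

theorem loopA_cnt_irrel (k x : Int) (rest : List Int) (h : headOk x rest)
    (r c c' : Int) (acc : List Int) :
    loopA k rest r c (some x) acc = loopA k rest r c' (some x) acc := by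
  cases rest with
  | nil => rfl
  | cons y t =>
    have hy : y ≠ x := h y t rfl
    simp [loopA, hy]

theorem loopA_run (k x : Int) (rest : List Int) (h : headOk x rest) (hk : 1 ≤ k) :
    ∀ (j : Nat) (r c : Int) (acc : List Int), 0 ≤ c → c ≤ k - 1 →
    loopA k (List.replicate j x ++ rest) r c (some x) acc
      = loopA k rest (r + j) 0 (some x) (acc ++ PySem.List.pyRange (r - c) (r + j - k + 1) 1) := by
  intro j
  induction j with
  | zero =>
    intro r c acc hc0 hck
    simp only [Nat.cast_zero, add_zero, List.replicate, List.nil_append]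
    rw [PySem.List.pyRange_one_eq_nil (by omega : r - k + 1 ≤ r - c)]
    simp only [List.append_nil]
    exact loopA_cnt_irrel k x rest h r c 0 acc
  | succ j ih =>
    intro r c acc hc0 hck
    by_cases hhit : c + 1 = k
    · have hc : c = k - 1 := by omega
      have step : loopA k (List.replicate (j+1) x ++ rest) r c (some x) acc
          = loopA k (List.replicate j x ++ rest) (r + 1) (k - 1) (some x) (acc ++ [r - k + 1]) := by
        simp [List.replicate_succ, loopA, hhit]
      rw [step, ih (r+1) (k-1) _ (by omega) (by omega)]
      have hr : r - k + 1 = r - c := by omega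
      have hcons : PySem.List.pyRange (r - c) (r + (↑(j+1) : Int) - k + 1) 1
          = (r - c) :: PySem.List.pyRange (r - c + 1) (r + (↑(j+1) : Int) - k + 1) 1 :=
        PySem.List.pyRange_one_cons (by push_cast; omega)
      have h2 : r + 1 - (k - 1) = r - c + 1 := by omega
      have h3 : r + 1 + (j : Int) - k + 1 = r + (↑(j+1) : Int) - k + 1 := by push_cast; omega
      have h4 : r + 1 + (j : Int) = r + (↑(j+1) : Int) := by push_cast; omega
      rw [hr, h2, h3, h4, hcons]
      simp
    · have step : loopA k (List.replicate (j+1) x ++ rest) r c (some x) acc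
          = loopA k (List.replicate j x ++ rest) (r + 1) (c + 1) (some x) acc := by
        simp [List.replicate_succ, loopA, hhit]
      rw [step, ih (r+1) (c+1) _ (by omega) (by omega)]
      have h2 : r + 1 - (c + 1) = r - c := by omega
      have h3 : r + 1 + (j : Int) - k + 1 = r + (↑(j+1) : Int) - k + 1 := by push_cast; omega
      have h4 : r + 1 + (j : Int) = r + (↑(j+1) : Int) := by push_cast; omega
      rw [h2, h3, h4]

theorem loopA_fresh_run (k x : Int) (rest : List Int) (h : headOk x rest) (hk : 1 ≤ k)
    (j : Nat) (r c : Int) (prev : Option Int) (hprev : prev ≠ some x) (acc : List Int) :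
    loopA k (x :: (List.replicate j x ++ rest)) r c prev acc
      = loopA k rest (r + (↑(j+1) : Int)) 0 (some x)
          (acc ++ PySem.List.pyRange r (r + (↑(j+1) : Int) - k + 1) 1) := by
  have hne : ¬ (some x = prev) := fun hh => hprev hh.symm
  by_cases h1 : (1 : Int) = k
  · have step : loopA k (x :: (List.replicate j x ++ rest)) r c prev acc
        = loopA k (List.replicate j x ++ rest) (r + 1) 0 (some x) (acc ++ [r - k + 1]) := by
      simp [loopA, hne, ← h1]
    rw [step, loopA_run k x rest h hk j (r+1) 0 _ (by omega) (by omega)]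
    have hr : r - k + 1 = r := by omega
    have hcons : PySem.List.pyRange r (r + (↑(j+1) : Int) - k + 1) 1
        = r :: PySem.List.pyRange (r + 1) (r + (↑(j+1) : Int) - k + 1) 1 :=
      PySem.List.pyRange_one_cons (by push_cast; omega)
    have h2 : r + 1 - 0 = r + 1 := by omega
    have h3 : r + 1 + (j : Int) - k + 1 = r + (↑(j+1) : Int) - k + 1 := by push_cast; omega
    have h4 : r + 1 + (j : Int) = r + (↑(j+1) : Int) := by push_cast; omega
    rw [hr, h2, h3, h4, hcons]
    simp
  · have step : loopA k (x :: (List.replicate j x ++ rest)) r c prev acc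
        = loopA k (List.replicate j x ++ rest) (r + 1) 1 (some x) acc := by
      simp [loopA, hne, fun hh : (1:Int) = k => h1 hh]
    rw [step, loopA_run k x rest h hk j (r+1) 1 _ (by omega) (by omega)]
    have h3 : r + 1 + (j : Int) - k + 1 = r + (↑(j+1) : Int) - k + 1 := by push_cast; omega
    have h4 : r + 1 + (j : Int) = r + (↑(j+1) : Int) := by push_cast; omega
    have h2 : r + 1 - 1 = r := by omega
    rw [h2, h3, h4]

theorem loopA_nonpos (k : Int) (hk : k ≤ 0) :
    ∀ (nums : List Int) (r cnt : Int) (prev : Option Int) (acc : List Int), 0 ≤ cnt →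
    loopA k nums r cnt prev acc = acc := by
  intro nums
  induction nums with
  | nil => intro r cnt prev acc _; rfl
  | cons x t ih =>
    intro r cnt prev acc hcnt
    have h1 : ¬ (cnt + 1 = k) := by omega
    have h2 : ¬ ((1 : Int) = k) := by omega
    by_cases hp : some x = prev
    · simp [loopA, hp, h1]; exact ih _ _ _ _ (by omega)
    · simp [loopA, hp, h2]; exact ih _ _ _ _ (by omega)

theorem spanLen_decomp (x : Int) : ∀ (t : List Int),
    t = List.replicate (spanLen x t) x ++ List.drop (spanLen x t) t := by
  intro t
  induction t with
  | nil => rfl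
  | cons y s ih =>
    by_cases hy : y = x
    · simp [spanLen, hy, List.replicate_succ]
      exact hy ▸ ih
    · simp [spanLen, hy]

theorem spanLen_headOk (x : Int) : ∀ (t : List Int),
    headOk x (List.drop (spanLen x t) t) := by
  intro t
  induction t with
  | nil => intro y s h; simp at h
  | cons y s ih =>
    by_cases hy : y = x
    · simpa [spanLen, hy] using ih
    · intro z u h
      simp [spanLen, hy] at h
      rw [← h.1]; exact hy

theorem main_equiv (k : Int) (hk : 1 ≤ k) (nums : List Int) :
    ∀ (r c : Int) (prev : Option Int),
      (∀ y t, nums = y :: t → prev ≠ some y) → ∀ (acc : List Int),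
    loopA k nums r c prev acc = bLoop k nums r acc := by
  match nums with
    | [] => intro r c prev _ acc; simp [loopA, bLoop]
    | x :: t =>
      intro r c prev hprev acc
      have hdec := spanLen_decomp x t
      have hok := spanLen_headOk x t
      set m := spanLen x t with hm
      set rest := List.drop m t with hrest
      have hstep : loopA k (x :: t) r c prev acc
          = loopA k rest (r + (↑(m+1) : Int)) 0 (some x)
              (acc ++ PySem.List.pyRange r (r + (↑(m+1) : Int) - k + 1) 1) := by
        conv_lhs => rw [show x :: t = x :: (List.replicate m x ++ rest) from by rw [← hdec]]
        exact loopA_fresh_run k x rest hok hk m r c prev (hprev x t rfl) acc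
      rw [hstep]
      have hlen : rest.length < (x :: t).length := by
        simp [hrest]
      have hprev' : ∀ y u, rest = y :: u → (some x : Option Int) ≠ some y := by
        intro y u h hxy
        exact hok y u h (Option.some_inj.mp hxy).symm
      rw [main_equiv k hk rest (r + (↑(m+1) : Int)) 0 (some x) hprev' _]
      conv_rhs => rw [bLoop]
  termination_by nums.length
  decreasing_by exact hlen

theorem detect_k_consecutive_spec' :
    ∀ (nums : List Int) (k : Int), detect_k_consecutive nums k = detect_k_consecutive_alt nums k := by
  intro nums k
  unfold detect_k_consecutive detect_k_consecutive_alt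
  by_cases hbig : k > (nums.length : Int)
  · simp [hbig]
  · by_cases hpos : k ≤ 0
    · simp [hbig, hpos, loopA_nonpos k hpos nums 0 0 none [] le_rfl]
    · have hk : 1 ≤ k := by omega
      simp only [hbig, if_false, hpos, or_false]
      rw [main_equiv k hk nums 0 0 none (fun y t _ => by simp) []]

-- ===== VERDICT (by name: the statement is the Claim_ definition above) =====
theorem detect_k_consecutive_spec : Claim_equal_detect_k_consecutive := by
  intro nums k _
  exact detect_k_consecutive_spec' nums k
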